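-- pv_equiv track=rewrite | github.com/garam0107/swea | Day13_0828_tree2/problem/노드의 합.py | hap_tree
-- ===== SOURCE A (Python) =====
-- def hap_tree(array,N):
--     for i in range(N,0,-1):
--         if array[i] == 0:
--             if i*2 <= N:
--                 array[i] += array[i*2]
--             if i*2+1 <= N:
--                 array[i] += array[i*2+1]
--     return array
-- ===== SOURCE B (Python) =====
-- def hap_tree(array, N):
--     # Recursive post-order fill over the implicit heap tree rooted at node 1.
--     def fill(i):
--         if i * 2 <= N:
--             fill(i * 2)
--         if i * 2 + 1 <= N:
--             fill(i * 2 + 1)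
--         if array[i] == 0:
--             if i * 2 <= N:
--                 array[i] += array[i * 2]
--             if i * 2 + 1 <= N:
--                 array[i] += array[i * 2 + 1]
--     if N >= 1:
--         fill(1)
--     return array
-- ===== Notes on version B (the rewrite author's own statement) =====
-- stated objective: alternative
-- what changed: Replaces A's reverse index scan range(N,0,-1) with a recursive post-order traversal of the implicit heap tree rooted at node 1 (children filled before their parent).
import Mathlib
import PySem

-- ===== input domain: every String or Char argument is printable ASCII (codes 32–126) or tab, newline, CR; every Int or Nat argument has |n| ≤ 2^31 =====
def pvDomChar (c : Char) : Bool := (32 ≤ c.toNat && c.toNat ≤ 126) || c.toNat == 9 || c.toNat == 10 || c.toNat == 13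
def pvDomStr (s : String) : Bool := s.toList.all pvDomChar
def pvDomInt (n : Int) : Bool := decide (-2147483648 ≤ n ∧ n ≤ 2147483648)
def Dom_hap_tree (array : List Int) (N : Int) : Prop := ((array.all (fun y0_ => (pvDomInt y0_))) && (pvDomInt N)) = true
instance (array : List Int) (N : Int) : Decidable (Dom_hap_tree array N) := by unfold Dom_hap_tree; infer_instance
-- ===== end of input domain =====

-- B replaces A's reverse index scan with a recursive post-order traversal of the heap tree
-- rooted at node 1 (alternative decomposition, same cost). Both Pythons mutate `array` in
-- place and return it; the equivalence proved is about the returned list (the in-place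
-- mutation is the same in both).

-- ===== PORT A =====
-- one iteration of A's loop body at index i (indices are in range under Pre_, where
-- pyGetD/pySetD are exact for Python's array[i] read/write)
def hapStep (N : Int) (arr : List Int) (i : Int) : List Int :=
  if PySem.List.pyGetD arr i 0 = 0 then
    let arr1 := if i * 2 ≤ N then
        PySem.List.pySetD arr i (PySem.List.pyGetD arr i 0 + PySem.List.pyGetD arr (i * 2) 0)
      else arr
    if i * 2 + 1 ≤ N then
      PySem.List.pySetD arr1 i (PySem.List.pyGetD arr1 i 0 + PySem.List.pyGetD arr1 (i * 2 + 1) 0)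
    else arr1
  else arr

def hap_tree (array : List Int) (N : Int) : List Int :=
  (PySem.List.pyRange N 0 (-1)).foldl (hapStep N) array

-- ===== PORT B =====
-- recursive post-order fill of the subtree rooted at i; i is kept as a Nat (it is always
-- ≥ 1 in B's Python) and the `i = 0` guard only makes the recursion well-founded — it is
-- never reached from hap_tree_alt
def fillAlt (N : Int) (arr : List Int) (i : Nat) : List Int :=
  if i = 0 then arr else
  let arr1 := if ((i * 2 : Nat) : Int) ≤ N then fillAlt N arr (i * 2) else arr
  let arr2 := if ((i * 2 + 1 : Nat) : Int) ≤ N then fillAlt N arr1 (i * 2 + 1) else arr1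
  if arr2.getD i 0 = 0 then
    let arr3 := if ((i * 2 : Nat) : Int) ≤ N then arr2.set i (arr2.getD i 0 + arr2.getD (i * 2) 0) else arr2
    if ((i * 2 + 1 : Nat) : Int) ≤ N then arr3.set i (arr3.getD i 0 + arr3.getD (i * 2 + 1) 0) else arr3
  else arr2
termination_by N.toNat + 1 - i
decreasing_by all_goals (simp_wf; omega)

def hap_tree_alt (array : List Int) (N : Int) : List Int :=
  if 1 ≤ N then fillAlt N array 1 else array

-- ===== PRECONDITION & SPEC =====
-- A raises IndexError when N ≥ 1 and N ≥ len(array) (it reads array[N]); exactly those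
-- inputs are excluded.
def Pre_hap_tree (array : List Int) (N : Int) : Prop := N ≤ 0 ∨ N < (array.length : Int)
instance (array : List Int) (N : Int) : Decidable (Pre_hap_tree array N) := by
  unfold Pre_hap_tree; infer_instance

def pvWitness_hap_tree : List Int × Int := ([0, 3, 0, 1, 2], 4)

def Spec_hap_tree (array : List Int) (N : Int) (out : List Int) : Prop := out = hap_tree_alt array N
instance (array : List Int) (N : Int) (out : List Int) : Decidable (Spec_hap_tree array N out) := by
  unfold Spec_hap_tree; infer_instance

-- ===== CLAIM (what is proved, stated in full; the proofs are below) =====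
def Claim_equal_hap_tree : Prop := ∀ (array : List Int) (N : Int), Dom_hap_tree array N → Pre_hap_tree array N → Spec_hap_tree array N (hap_tree array N)

-- ===== LEMMAS AND PROOFS =====

-- the final value of node i (heap bound n): its value in arr if nonzero, else the sum of
-- its children's final values
def sol (n : Nat) (arr : List Int) (i : Nat) : Int :=
  if i = 0 then 0 else
  if arr.getD i 0 = 0 then
    (if i * 2 ≤ n then sol n arr (i * 2) else 0) +
    (if i * 2 + 1 ≤ n then sol n arr (i * 2 + 1) else 0)
  else arr.getD i 0
termination_by n + 1 - i
decreasing_by all_goals omega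

-- j lies in the heap subtree rooted at i (chase parents j → j/2 until reaching i)
def inSub (i j : Nat) : Bool :=
  if j < i ∨ j = 0 then false else if j = i then true else inSub i (j / 2)
termination_by j
decreasing_by omega

theorem inSub_le (i j : Nat) (h : inSub i j = true) : i ≤ j := by
  unfold inSub at h
  split at h
  · simp at h
  · omega

theorem inSub_self (i : Nat) (h : 1 ≤ i) : inSub i i = true := by
  unfold inSub; simp; omega

theorem inSub_one (j : Nat) (h : 1 ≤ j) : inSub 1 j = true := by
  induction j using Nat.strong_induction_on with
  | _ j ih =>
    unfold inSub
    rcases Nat.lt_or_ge j 2 with hj | hj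
    · interval_cases j <;> simp_all
    · have h2 : ¬ (j < 1 ∨ j = 0) := by omega
      simp only [h2, if_false]
      split
      · rfl
      · exact ih (j/2) (by omega) (by omega)

theorem inSub_split (i j : Nat) (hi : 1 ≤ i) :
    inSub i j = (decide (j = i) || inSub (i * 2) j || inSub (i * 2 + 1) j) := by
  induction j using Nat.strong_induction_on with
  | _ j ih =>
    have fls : ∀ a, j < a → inSub a j = false := by
      intro a ha
      cases h : inSub a j
      · rfl
      · have := inSub_le _ _ h; omega
    by_cases hji : j = i
    · subst hji
      rw [inSub_self j hi, fls _ (by omega), fls _ (by omega)]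
      simp
    · by_cases hlt : j < i ∨ j = 0
      · conv_lhs => unfold inSub
        rw [if_pos hlt, fls _ (by omega), fls _ (by omega)]
        simp [hji]
      · conv_lhs => unfold inSub
        rw [if_neg hlt, if_neg hji]
        by_cases hc : j = i * 2 ∨ j = i * 2 + 1
        · have hji2 : j / 2 = i := by omega
          rw [hji2, inSub_self i hi]
          rcases hc with hc | hc
          · subst hc
            rw [inSub_self (i*2) (by omega)]
            simp
          · subst hc
            rw [inSub_self (i*2+1) (by omega)]
            simp
        · by_cases hsm : j < i * 2
          · -- i < j < 2i: nothing holds on either side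
            have h2 : j / 2 < i := by omega
            have l0 : inSub i (j / 2) = false := by
              cases h : inSub i (j/2)
              · rfl
              · have := inSub_le _ _ h; omega
            rw [l0, fls _ (by omega), fls _ (by omega)]
            simp [hji]
          · -- j ≥ 2i+2
            have hbig : i * 2 + 1 < j := by omega
            have ea : inSub (i * 2) j = inSub (i * 2) (j / 2) := by
              conv_lhs => unfold inSub
              rw [if_neg (show ¬ (j < i*2 ∨ j = 0) by omega), if_neg (show ¬ j = i*2 by omega)]
            have eb : inSub (i * 2 + 1) j = inSub (i * 2 + 1) (j / 2) := by
              conv_lhs => unfold inSub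
              rw [if_neg (show ¬ (j < i*2+1 ∨ j = 0) by omega), if_neg (show ¬ j = i*2+1 by omega)]
            rw [ih (j / 2) (by omega), ea, eb]
            simp [show ¬ (j / 2 = i) by omega, hji]

theorem sol_zero (n : Nat) (arr : List Int) : sol n arr 0 = 0 := by
  rw [sol]; simp

theorem sol_stable (n : Nat) (arr0 arr : List Int)
    (h : ∀ m, arr.getD m 0 = arr0.getD m 0 ∨ arr.getD m 0 = sol n arr0 m) :
    ∀ j, sol n arr j = sol n arr0 j := by
  suffices H : ∀ d j, n + 1 - j ≤ d → sol n arr j = sol n arr0 j by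
    intro j; exact H (n + 1) j (by omega)
  intro d
  induction d with
  | zero =>
    intro j hj
    by_cases hj0 : j = 0
    · subst hj0; rw [sol_zero, sol_zero]
    · have g1 : ¬ (j * 2 ≤ n) := by omega
      have g2 : ¬ (j * 2 + 1 ≤ n) := by omega
      rcases h j with he | he
      · conv_lhs => rw [sol]
        conv_rhs => rw [sol]
        simp only [if_neg hj0, if_neg g1, if_neg g2, he]
      · conv_lhs => rw [sol]
        simp only [if_neg hj0, if_neg g1, if_neg g2, he]
        by_cases h0 : sol n arr0 j = 0
        · simp [h0]
        · simp [h0]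
  | succ d ih =>
    intro j hj
    by_cases hj0 : j = 0
    · subst hj0; rw [sol_zero, sol_zero]
    · have hch : ∀ m, j * 2 ≤ m → m ≤ j * 2 + 1 → m ≤ n → sol n arr m = sol n arr0 m := by
        intro m h1 h2 h3; exact ih m (by omega)
      have hsum : arr0.getD j 0 = 0 →
          ((if j * 2 ≤ n then sol n arr (j * 2) else 0) +
           (if j * 2 + 1 ≤ n then sol n arr (j * 2 + 1) else 0)) = sol n arr0 j := by
        intro ha0
        conv_rhs => rw [sol]
        simp only [if_neg hj0, ha0, if_true, if_pos]
        congr 1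
        · split
          next hg => exact hch _ (by omega) (by omega) hg
          next => rfl
        · split
          next hg => exact hch _ (by omega) (by omega) hg
          next => rfl
      rcases h j with he | he
      · conv_lhs => rw [sol]
        simp only [if_neg hj0, he]
        by_cases h0 : arr0.getD j 0 = 0
        · simp only [h0, if_pos rfl, if_true]
          rw [hsum h0]
        · simp only [if_neg h0]
          conv_rhs => rw [sol]
          simp only [if_neg hj0, if_neg h0]
      · conv_lhs => rw [sol]
        simp only [if_neg hj0, he]
        by_cases h0 : sol n arr0 j = 0
        · have ha0 : arr0.getD j 0 = 0 := by
            by_contra hne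
            rw [sol] at h0
            simp only [if_neg hj0, if_neg hne] at h0
            exact hne h0
          rw [h0]
          simp only [if_pos rfl]
          rw [hsum ha0, h0]
          simp
        · simp only [if_neg h0]

theorem getD_set_self (xs : List Int) (i : Nat) (v : Int) (h : i < xs.length) :
    (xs.set i v).getD i 0 = v := by
  simp [List.getD_eq_getElem?_getD, h]
theorem getD_set_ne (xs : List Int) (i j : Nat) (v : Int) (h : j ≠ i) :
    (xs.set i v).getD j 0 = xs.getD j 0 := by
  simp [List.getD_eq_getElem?_getD, List.getElem?_set_ne (Ne.symm h)]

theorem fill_char (n : Nat) : ∀ (d i : Nat), ∀ arr : List Int, 1 ≤ i → i ≤ n → n < arr.length →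
    n + 1 - i ≤ d →
    (fillAlt (n : Int) arr i).length = arr.length ∧
    ∀ j, (fillAlt (n : Int) arr i).getD j 0 =
      if inSub i j ∧ j ≤ n then sol n arr j else arr.getD j 0 := by
  intro d
  induction d with
  | zero => intro i arr h1 hin hlen hd; omega
  | succ d ih =>
    intro i arr h1 hin hlen hd
    have hi0 : ¬ i = 0 := by omega
    -- the two recursive calls
    have hB1 : ((if ((i * 2 : Nat) : Int) ≤ (n : Int) then fillAlt (n : Int) arr (i * 2) else arr)).length = arr.length ∧
        ∀ j, ((if ((i * 2 : Nat) : Int) ≤ (n : Int) then fillAlt (n : Int) arr (i * 2) else arr)).getD j 0 =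
          if inSub (i * 2) j ∧ j ≤ n then sol n arr j else arr.getD j 0 := by
      by_cases g1 : i * 2 ≤ n
      · rw [if_pos (by exact_mod_cast g1)]
        exact ih (i * 2) arr (by omega) g1 hlen (by omega)
      · rw [if_neg (by exact_mod_cast g1)]
        refine ⟨rfl, fun j => ?_⟩
        rw [if_neg]
        rintro ⟨hs, hj⟩
        have := inSub_le _ _ hs; omega
    set b1 := (if ((i * 2 : Nat) : Int) ≤ (n : Int) then fillAlt (n : Int) arr (i * 2) else arr) with hb1def
    obtain ⟨hb1len, hb1⟩ := hB1
    have hstab1 : ∀ j, sol n b1 j = sol n arr j := by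
      apply sol_stable
      intro m; rw [hb1 m]; split
      · right; rfl
      · left; rfl
    have hB2 : ((if ((i * 2 + 1 : Nat) : Int) ≤ (n : Int) then fillAlt (n : Int) b1 (i * 2 + 1) else b1)).length = b1.length ∧
        ∀ j, ((if ((i * 2 + 1 : Nat) : Int) ≤ (n : Int) then fillAlt (n : Int) b1 (i * 2 + 1) else b1)).getD j 0 =
          if inSub (i * 2 + 1) j ∧ j ≤ n then sol n b1 j else b1.getD j 0 := by
      by_cases g2 : i * 2 + 1 ≤ n
      · rw [if_pos (by exact_mod_cast g2)]
        exact ih (i * 2 + 1) b1 (by omega) g2 (by omega) (by omega)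
      · rw [if_neg (by exact_mod_cast g2)]
        refine ⟨rfl, fun j => ?_⟩
        rw [if_neg]
        rintro ⟨hs, hj⟩
        have := inSub_le _ _ hs; omega
    set b2 := (if ((i * 2 + 1 : Nat) : Int) ≤ (n : Int) then fillAlt (n : Int) b1 (i * 2 + 1) else b1) with hb2def
    obtain ⟨hb2len, hb2'⟩ := hB2
    have hb2 : ∀ j, b2.getD j 0 =
        if (inSub (i * 2) j ∨ inSub (i * 2 + 1) j) ∧ j ≤ n then sol n arr j else arr.getD j 0 := by
      intro j
      rw [hb2' j]
      by_cases hj : j ≤ n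
      · by_cases hs2 : inSub (i * 2 + 1) j = true
        · rw [if_pos ⟨hs2, hj⟩, if_pos ⟨Or.inr hs2, hj⟩, hstab1]
        · rw [if_neg (by tauto), hb1 j]
          by_cases hs1 : inSub (i * 2) j = true
          · rw [if_pos ⟨hs1, hj⟩, if_pos ⟨Or.inl hs1, hj⟩]
          · rw [if_neg (by tauto), if_neg (by tauto)]
      · rw [if_neg (by tauto), hb1 j, if_neg (by tauto), if_neg (by tauto)]
    have hb2len' : b2.length = arr.length := by omega
    -- unfold one step of fillAlt
    have unf : fillAlt (n : Int) arr i =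
        (if b2.getD i 0 = 0 then
          let arr3 := if ((i * 2 : Nat) : Int) ≤ (n : Int) then b2.set i (b2.getD i 0 + b2.getD (i * 2) 0) else b2
          if ((i * 2 + 1 : Nat) : Int) ≤ (n : Int) then arr3.set i (arr3.getD i 0 + arr3.getD (i * 2 + 1) 0) else arr3
        else b2) := by
      conv_lhs => rw [fillAlt]
      rw [if_neg hi0]
    have noti1 : inSub (i * 2) i ≠ true := fun hs => by have := inSub_le _ _ hs; omega
    have noti2 : inSub (i * 2 + 1) i ≠ true := fun hs => by have := inSub_le _ _ hs; omega
    have hb2i : b2.getD i 0 = arr.getD i 0 := by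
      rw [hb2 i, if_neg (by tauto)]
    rw [unf]
    have match_j : ∀ j, j ≠ i →
        (if inSub i j ∧ j ≤ n then sol n arr j else arr.getD j 0) =
        (if (inSub (i * 2) j ∨ inSub (i * 2 + 1) j) ∧ j ≤ n then sol n arr j else arr.getD j 0) := by
      intro j hji
      rw [inSub_split i j h1]
      by_cases hj : j ≤ n
      · by_cases hs : (inSub (i * 2) j = true) ∨ (inSub (i * 2 + 1) j = true)
        · rw [if_pos ⟨by simp [hji]; tauto, hj⟩, if_pos ⟨by tauto, hj⟩]
        · rw [if_neg (by simp [hji]; tauto), if_neg (by tauto)]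
      · rw [if_neg (by tauto), if_neg (by tauto)]
    have hib : i < b2.length := by omega
    by_cases h0 : arr.getD i 0 = 0
    · rw [if_pos (by rw [hb2i]; exact h0)]
      have soli : sol n arr i =
          (if i * 2 ≤ n then sol n arr (i * 2) else 0) +
          (if i * 2 + 1 ≤ n then sol n arr (i * 2 + 1) else 0) := by
        conv_lhs => rw [sol]
        rw [if_neg hi0, if_pos h0]
      by_cases g1 : i * 2 ≤ n
      · have hg1 : ((i * 2 : Nat) : Int) ≤ (n : Int) := by exact_mod_cast g1
        have e2i : b2.getD (i * 2) 0 = sol n arr (i * 2) := by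
          rw [hb2]; exact if_pos ⟨Or.inl (inSub_self _ (by omega)), g1⟩
        by_cases g2 : i * 2 + 1 ≤ n
        · have hg2 : ((i * 2 + 1 : Nat) : Int) ≤ (n : Int) := by exact_mod_cast g2
          have e2i1 : b2.getD (i * 2 + 1) 0 = sol n arr (i * 2 + 1) := by
            rw [hb2]; exact if_pos ⟨Or.inr (inSub_self _ (by omega)), g2⟩
          simp only [if_pos hg1, if_pos hg2]
          constructor
          · simp only [List.length_set]; omega
          · intro j
            by_cases hji : j = i
            · subst hji
              have sv1 : (b2.set j (b2.getD j 0 + b2.getD (j * 2) 0)).getD j 0 = 0 + sol n arr (j * 2) := by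
                rw [getD_set_self _ _ _ hib, e2i, hb2i, h0]
              have sv2 : (b2.set j (b2.getD j 0 + b2.getD (j * 2) 0)).getD (j * 2 + 1) 0 = sol n arr (j * 2 + 1) := by
                rw [getD_set_ne _ _ _ _ (by omega), e2i1]
              rw [getD_set_self _ _ _ (by simpa using hib), sv1, sv2]
              rw [if_pos ⟨inSub_self j h1, hin⟩, soli, if_pos g1, if_pos g2]
              simp
            · rw [getD_set_ne _ _ _ _ hji, getD_set_ne _ _ _ _ hji, hb2 j, match_j j hji]
        · have hg2 : ¬ ((i * 2 + 1 : Nat) : Int) ≤ (n : Int) := by exact_mod_cast g2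
          simp only [if_pos hg1, if_neg hg2]
          constructor
          · simp only [List.length_set]; omega
          · intro j
            by_cases hji : j = i
            · subst hji
              rw [getD_set_self _ _ _ hib, e2i, hb2i, h0]
              rw [if_pos ⟨inSub_self j h1, hin⟩, soli, if_pos g1, if_neg g2]
              simp
            · rw [getD_set_ne _ _ _ _ hji, hb2 j, match_j j hji]
      · have g2 : ¬ i * 2 + 1 ≤ n := by omega
        have hg1 : ¬ ((i * 2 : Nat) : Int) ≤ (n : Int) := by exact_mod_cast g1
        have hg2 : ¬ ((i * 2 + 1 : Nat) : Int) ≤ (n : Int) := by exact_mod_cast g2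
        simp only [if_neg hg1, if_neg hg2]
        refine ⟨by omega, fun j => ?_⟩
        by_cases hji : j = i
        · subst hji
          rw [hb2i, h0, if_pos ⟨inSub_self j h1, hin⟩, soli, if_neg g1, if_neg g2]
          simp
        · rw [hb2 j, match_j j hji]
    · rw [if_neg (by rw [hb2i]; exact h0)]
      refine ⟨by omega, fun j => ?_⟩
      by_cases hji : j = i
      · subst hji
        rw [hb2i, if_pos ⟨inSub_self j h1, hin⟩]
        rw [sol, if_neg hi0, if_neg h0]
      · rw [hb2 j, match_j j hji]

theorem loopA_char (n : Nat) (arr0 : List Int) (hlen0 : n < arr0.length) :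
    ∀ (k : Nat), k ≤ n → ∀ arr : List Int, arr.length = arr0.length →
    (∀ m, arr.getD m 0 = if k < m ∧ m ≤ n then sol n arr0 m else arr0.getD m 0) →
    ((PySem.List.pyRange (k : Int) 0 (-1)).foldl (hapStep (n : Int)) arr).length = arr0.length ∧
    ∀ j, ((PySem.List.pyRange (k : Int) 0 (-1)).foldl (hapStep (n : Int)) arr).getD j 0 =
      if 1 ≤ j ∧ j ≤ n then sol n arr0 j else arr0.getD j 0 := by
  intro k
  induction k with
  | zero =>
    intro hk arr hlen hyp
    rw [show ((0 : Nat) : Int) = 0 by norm_num, PySem.List.pyRange_neg_one_eq_nil (by norm_num)]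
    simp only [List.foldl_nil]
    refine ⟨hlen, fun j => ?_⟩
    rw [hyp j]
    by_cases hj : 1 ≤ j ∧ j ≤ n
    · rw [if_pos ⟨by omega, hj.2⟩, if_pos hj]
    · rw [if_neg (by omega), if_neg hj]
  | succ k ih =>
    intro hk arr hlen hyp
    have hcons : PySem.List.pyRange ((k + 1 : Nat) : Int) 0 (-1) =
        ((k + 1 : Nat) : Int) :: PySem.List.pyRange ((k : Nat) : Int) 0 (-1) := by
      rw [PySem.List.pyRange_neg_one_cons (by exact_mod_cast Nat.succ_pos k)]
      congr 1
      push_cast; ring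
    rw [hcons, List.foldl_cons]
    have c2 : ((k + 1 : Nat) : Int) * 2 = (((k + 1) * 2 : Nat) : Int) := by push_cast; ring
    have c3 : (((k + 1) * 2 : Nat) : Int) + 1 = (((k + 1) * 2 + 1 : Nat) : Int) := by push_cast; ring
    have hk1 : arr.getD (k + 1) 0 = arr0.getD (k + 1) 0 := by
      rw [hyp, if_neg (by omega)]
    have hstep : (hapStep (n : Int) arr ((k + 1 : Nat) : Int)).length = arr0.length ∧
        ∀ m, (hapStep (n : Int) arr ((k + 1 : Nat) : Int)).getD m 0 =
          if k < m ∧ m ≤ n then sol n arr0 m else arr0.getD m 0 := by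
      rw [hapStep, c2, c3]
      simp only [PySem.List.pyGetD_natCast, PySem.List.pySetD_natCast, Nat.cast_le]
      rw [hk1]
      have hsame : ∀ m, m ≠ k + 1 → ((if k < m ∧ m ≤ n then sol n arr0 m else arr0.getD m 0)
          = arr.getD m 0) := by
        intro m hm
        rw [hyp m]
        by_cases hc : k + 1 < m ∧ m ≤ n
        · rw [if_pos hc, if_pos ⟨by omega, hc.2⟩]
        · by_cases hc2 : k < m ∧ m ≤ n
          · omega
          · rw [if_neg hc, if_neg hc2]
      by_cases h0 : arr0.getD (k + 1) 0 = 0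
      · rw [if_pos h0]
        have soli : sol n arr0 (k + 1) =
            (if (k + 1) * 2 ≤ n then sol n arr0 ((k + 1) * 2) else 0) +
            (if (k + 1) * 2 + 1 ≤ n then sol n arr0 ((k + 1) * 2 + 1) else 0) := by
          conv_lhs => rw [sol]
          rw [if_neg (by omega), if_pos h0]
        by_cases g1 : (k + 1) * 2 ≤ n
        · have e2 : arr.getD ((k + 1) * 2) 0 = sol n arr0 ((k + 1) * 2) := by
            rw [hyp, if_pos ⟨by omega, g1⟩]
          by_cases g2 : (k + 1) * 2 + 1 ≤ n
          · have e3 : arr.getD ((k + 1) * 2 + 1) 0 = sol n arr0 ((k + 1) * 2 + 1) := by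
              rw [hyp, if_pos ⟨by omega, g2⟩]
            simp only [if_pos g1, if_pos g2]
            constructor
            · simp only [List.length_set]; omega
            · intro m
              by_cases hm : m = k + 1
              · subst hm
                have sv1 : (arr.set (k + 1) (arr0.getD (k + 1) 0 + arr.getD ((k + 1) * 2) 0)).getD (k + 1) 0 =
                    0 + sol n arr0 ((k + 1) * 2) := by
                  rw [getD_set_self _ _ _ (by omega), h0, e2]
                have sv2 : (arr.set (k + 1) (arr0.getD (k + 1) 0 + arr.getD ((k + 1) * 2) 0)).getD ((k + 1) * 2 + 1) 0 =
                    sol n arr0 ((k + 1) * 2 + 1) := by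
                  rw [getD_set_ne _ _ _ _ (by omega), e3]
                rw [getD_set_self _ _ _ (by simp only [List.length_set]; omega), sv1, sv2]
                rw [if_pos ⟨by omega, by omega⟩, soli, if_pos g1, if_pos g2]
                simp
              · rw [getD_set_ne _ _ _ _ hm, getD_set_ne _ _ _ _ hm, hsame m hm]
          · simp only [if_pos g1, if_neg g2]
            constructor
            · simp only [List.length_set]; omega
            · intro m
              by_cases hm : m = k + 1
              · subst hm
                rw [getD_set_self _ _ _ (by omega), h0, e2]
                rw [if_pos ⟨by omega, by omega⟩, soli, if_pos g1, if_neg g2]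
                simp
              · rw [getD_set_ne _ _ _ _ hm, hsame m hm]
        · have g2 : ¬ (k + 1) * 2 + 1 ≤ n := by omega
          simp only [if_neg g1, if_neg g2]
          refine ⟨by omega, fun m => ?_⟩
          by_cases hm : m = k + 1
          · subst hm
            rw [hk1, h0, if_pos ⟨by omega, by omega⟩, soli, if_neg g1, if_neg g2]
            simp
          · rw [hsame m hm]
      · rw [if_neg h0]
        refine ⟨by omega, fun m => ?_⟩
        by_cases hm : m = k + 1
        · subst hm
          rw [hk1, if_pos ⟨by omega, by omega⟩]
          rw [sol, if_neg (by omega), if_neg h0]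
        · rw [hsame m hm]
    exact ih (by omega) _ hstep.1 hstep.2

-- ===== VERDICT (by name: the statement is the Claim_ definition above) =====
theorem hap_tree_spec : Claim_equal_hap_tree := by
  intro array N _dom hpre
  unfold Spec_hap_tree
  by_cases hN : 1 ≤ N
  · have hlenI : N < (array.length : Int) := by
      rcases hpre with h | h
      · omega
      · exact h
    set n := N.toNat with hn
    have hNn : N = (n : Int) := by omega
    have hlen : n < array.length := by omega
    have h1n : 1 ≤ n := by omega
    have hA := loopA_char n array hlen n le_rfl array rfl
      (fun m => by rw [if_neg (by omega)])
    have hB := fill_char n (n + 1) 1 array le_rfl h1n hlen (by omega)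
    have hBs : ∀ j, (fillAlt (n : Int) array 1).getD j 0 =
        if 1 ≤ j ∧ j ≤ n then sol n array j else array.getD j 0 := by
      intro j
      rw [hB.2 j]
      by_cases hj : 1 ≤ j ∧ j ≤ n
      · rw [if_pos ⟨inSub_one j hj.1, hj.2⟩, if_pos hj]
      · rw [if_neg, if_neg hj]
        rintro ⟨hs, hjn⟩
        have := inSub_le _ _ hs
        exact hj ⟨by omega, hjn⟩
    unfold hap_tree hap_tree_alt
    rw [if_pos hN, hNn]
    apply List.ext_getElem (by rw [hA.1, hB.1])
    intro j hja hjb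
    rw [← List.getD_eq_getElem _ 0 hja, ← List.getD_eq_getElem _ 0 hjb, hA.2 j, hBs j]
  · unfold hap_tree hap_tree_alt
    rw [PySem.List.pyRange_neg_one_eq_nil (by omega), if_neg hN]
    rfl
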